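-- pv_equiv track=rewrite | github.com/CodyBuilder-dev/Algorithm-Coding-Test | problems/programmers/lv2/pgs-42626-deque.py | solution
-- ===== SOURCE A (Python) =====
-- from collections import deque
--
-- def solution(scovile,K):
--     dq = deque()
--     scovile = deque(sorted(scovile))
--
--     cnt = 0
--     while len(scovile) + len(dq) >= 1:
--         if len(dq) == 0 :
--             smallest = scovile.popleft()
--         elif len(scovile) ==  0 :
--             smallest = dq.popleft()
--         elif dq[0] > scovile[0]:
--             smallest = scovile.popleft()
--         else :
--             smallest = dq.popleft()
--
--         if smallest >= K : return cnt
--         if len(dq) + len(scovile) ==0 : return -1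
--
--         if len(dq) == 0 :
--             second = scovile.popleft()
--         elif len(scovile) ==  0 :
--             second = dq.popleft()
--         elif dq[0] > scovile[0]:
--             second = scovile.popleft()
--         else :
--             second = dq.popleft()
--
--         dq.append(smallest+second*2)
--         cnt += 1
--
--     return cnt
-- ===== SOURCE B (Python) =====
-- def solution(scovile, K):
--     xs = sorted(scovile)
--     cnt = 0
--     while xs:
--         smallest = xs.pop(0)
--         if smallest >= K:
--             return cnt
--         if not xs:
--             return -1
--         second = xs.pop(0)
--         v = smallest + 2 * second
--         # insert v keeping xs sorted (after any equal values)
--         i = 0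
--         while i < len(xs) and xs[i] <= v:
--             i += 1
--         xs.insert(i, v)
--         cnt += 1
--     return cnt
-- ===== Notes on version B (the rewrite author's own statement) =====
-- stated objective: simpler
-- what changed: Replaces the two-deque structure (a sorted input queue plus a queue of mixed values, merged by a four-branch front comparison written out twice per iteration) with one plain sorted list maintained by in-order insertion; B is shorter and plainer but trades A's O(1) deque operations for O(n) list pop/insert, so it is slower on very large inputs.
import Mathlib
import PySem

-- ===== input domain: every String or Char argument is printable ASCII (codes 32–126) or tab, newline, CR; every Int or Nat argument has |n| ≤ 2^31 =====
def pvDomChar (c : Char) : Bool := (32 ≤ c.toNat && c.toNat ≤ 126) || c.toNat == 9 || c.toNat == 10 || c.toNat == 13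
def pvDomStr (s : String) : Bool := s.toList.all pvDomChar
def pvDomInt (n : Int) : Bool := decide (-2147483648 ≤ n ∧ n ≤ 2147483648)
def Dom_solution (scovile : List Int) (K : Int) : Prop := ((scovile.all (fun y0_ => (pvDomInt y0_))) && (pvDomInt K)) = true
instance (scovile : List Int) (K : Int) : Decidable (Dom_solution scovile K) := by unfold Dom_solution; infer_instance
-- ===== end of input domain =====

-- B replaces A's two-deque merge (four-branch front comparison, twice per iteration)
-- with a single sorted list maintained by sorted insertion; return values are proved equal.

-- ===== PORT A =====
-- the four-branch "pop the smaller front" block A writes out twice, as a helper: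
-- returns (popped value, remaining scovile deque, remaining dq)
def popStep (sc dq : List Int) : Int × List Int × List Int :=
  if dq = [] then (sc.headI, sc.tail, dq)
  else if sc = [] then (dq.headI, sc, dq.tail)
  else if sc.headI < dq.headI then (sc.headI, sc.tail, dq)  -- Python: dq[0] > scovile[0]
  else (dq.headI, sc, dq.tail)

-- termination helper for solLoop (cited in decreasing_by)
theorem popStep_len (sc dq : List Int) (h : 1 ≤ sc.length + dq.length) :
    (popStep sc dq).2.1.length + (popStep sc dq).2.2.length + 1 = sc.length + dq.length := by
  rcases sc with _ | ⟨a, s⟩ <;> rcases dq with _ | ⟨b, d⟩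
  · simp at h
  · simp [popStep]
  · simp [popStep]
  · simp only [popStep]
    split_ifs <;> simp [Nat.add_comm] <;> omega

-- the while-loop of A
def solLoop (K : Int) (sc dq : List Int) (cnt : Int) : Int :=
  if h1 : 1 ≤ sc.length + dq.length then
    if (popStep sc dq).1 ≥ K then cnt
    else if h3 : (popStep sc dq).2.2.length + (popStep sc dq).2.1.length = 0 then -1
    else
      solLoop K (popStep (popStep sc dq).2.1 (popStep sc dq).2.2).2.1
        ((popStep (popStep sc dq).2.1 (popStep sc dq).2.2).2.2 ++
          [(popStep sc dq).1 + (popStep (popStep sc dq).2.1 (popStep sc dq).2.2).1 * 2])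
        (cnt + 1)
  else cnt
termination_by sc.length + dq.length
decreasing_by
  have e1 := popStep_len sc dq h1
  have h1' : 1 ≤ (popStep sc dq).2.1.length + (popStep sc dq).2.2.length := by omega
  have e2 := popStep_len (popStep sc dq).2.1 (popStep sc dq).2.2 h1'
  simp only [List.length_append, List.length_cons, List.length_nil]
  omega

def solution (scovile : List Int) (K : Int) : Int :=
  solLoop K (PySem.List.sorted scovile (fun x => x) false) [] 0

-- ===== PORT B =====
-- Source B's inner insertion scan: insert v into xs after all elements ≤ v
def insort (v : Int) : List Int → List Int
  | [] => [v]
  | b :: l => if v < b then v :: b :: l else b :: insort v l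

-- termination helper for solAltLoop (cited in decreasing_by)
theorem insort_len (v : Int) (l : List Int) : (insort v l).length = l.length + 1 := by
  induction l with
  | nil => simp [insort]
  | cons b t ih => simp [insort]; split_ifs <;> simp [ih]

-- the while-loop of B
def solAltLoop (K : Int) : List Int → Int → Int
  | [], cnt => cnt
  | x :: xs, cnt =>
    if x ≥ K then cnt
    else
      match xs with
      | [] => -1
      | y :: rest => solAltLoop K (insort (x + 2 * y) rest) (cnt + 1)
termination_by l => l.length
decreasing_by simp [insort_len]

def solution_alt (scovile : List Int) (K : Int) : Int :=
  solAltLoop K (PySem.List.sorted scovile (fun x => x) false) 0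

-- ===== PRECONDITION & SPEC =====
def Spec_solution (scovile : List Int) (K : Int) (out : Int) : Prop := out = solution_alt scovile K
instance (scovile : List Int) (K : Int) (out : Int) : Decidable (Spec_solution scovile K out) := by unfold Spec_solution; infer_instance

-- ===== CLAIM (what is proved, stated in full; the proofs are below) =====
def Claim_equal_solution : Prop := ∀ (scovile : List Int) (K : Int), Dom_solution scovile K → Spec_solution scovile K (solution scovile K)

-- ===== LEMMAS AND PROOFS =====

theorem insort_mem (v x : Int) (l : List Int) : x ∈ insort v l ↔ x = v ∨ x ∈ l := by
  induction l with
  | nil => simp [insort]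
  | cons b t ih =>
    simp only [insort]
    split_ifs
    · simp [List.mem_cons]
    · simp only [List.mem_cons, ih]
      tauto

theorem insort_pairwise (v : Int) (l : List Int) (h : l.Pairwise (· ≤ ·)) :
    (insort v l).Pairwise (· ≤ ·) := by
  induction l with
  | nil => simp [insort]
  | cons b t ih =>
    rw [List.pairwise_cons] at h
    by_cases hvb : v < b
    · rw [insort, if_pos hvb, List.pairwise_cons, List.pairwise_cons]
      exact ⟨fun x hx => by
        rcases List.mem_cons.mp hx with rfl | hx
        · omega
        · exact le_of_lt (lt_of_lt_of_le hvb (h.1 x hx)), h.1, h.2⟩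
    · rw [insort, if_neg hvb, List.pairwise_cons]
      refine ⟨fun x hx => ?_, ih h.2⟩
      rcases (insort_mem v x t).mp hx with rfl | hxt
      · omega
      · exact h.1 x hxt

theorem insort_perm (v : Int) (l : List Int) : (insort v l).Perm (v :: l) := by
  induction l with
  | nil => simp [insort]
  | cons b t ih =>
    by_cases hvb : v < b
    · simp [insort, hvb]
    · simp only [insort, if_neg hvb]
      exact (ih.cons b).trans (List.Perm.swap v b t)

-- the popped element of A's four-branch block is the head of the sorted arrangement,
-- and the remainders keep their shape
theorem popStep_spec (sc dq : List Int) (v : Int) (l' : List Int)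
    (hsc : sc.Pairwise (· ≤ ·)) (hdq : dq.Pairwise (· ≤ ·))
    (hl : (v :: l').Pairwise (· ≤ ·)) (hp : (sc ++ dq).Perm (v :: l')) :
    (popStep sc dq).1 = v ∧
    ((popStep sc dq).2.1 ++ (popStep sc dq).2.2).Perm l' ∧
    ((popStep sc dq).2.1 = sc ∨ sc = v :: (popStep sc dq).2.1) ∧
    ((popStep sc dq).2.2 = dq ∨ dq = v :: (popStep sc dq).2.2) := by
  rcases dq with _ | ⟨b, d⟩
  · -- dq = [] : pop from sc; sc is sorted and ~ v::l', hence equal to it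
    have hsceq : sc = v :: l' := by
      exact List.Perm.eq_of_pairwise' hsc hl (by simpa using hp)
    subst hsceq
    refine ⟨rfl, by simp [popStep], ?_, by simp [popStep]⟩
    right; simp [popStep]
  · rcases sc with _ | ⟨a, s⟩
    · -- sc = [] : pop from dq
      have hdqeq : b :: d = v :: l' := by
        exact List.Perm.eq_of_pairwise' hdq hl (by simpa using hp)
      rw [List.cons_eq_cons] at hdqeq
      obtain ⟨rfl, rfl⟩ := hdqeq
      refine ⟨rfl, by simp [popStep], by simp [popStep], ?_⟩
      right; simp [popStep]
    · -- both nonempty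
      have hva : v ≤ a := by
        have ha : a ∈ v :: l' := hp.subset (by simp)
        rcases List.mem_cons.mp ha with rfl | h
        · exact le_refl _
        · exact (List.pairwise_cons.mp hl).1 a h
      have hvb : v ≤ b := by
        have hb : b ∈ v :: l' := hp.subset (by simp)
        rcases List.mem_cons.mp hb with rfl | h
        · exact le_refl _
        · exact (List.pairwise_cons.mp hl).1 b h
      have hvmem : v ∈ (a :: s) ++ (b :: d) := hp.symm.subset (by simp)
      by_cases hab : a < b
      · -- pop from sc, value a; show v = a
        have hveq : v = a := by
          rcases List.mem_append.mp hvmem with h | h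
          · rcases List.mem_cons.mp h with rfl | h
            · rfl
            · have := (List.pairwise_cons.mp hsc).1 v h; omega
          · rcases List.mem_cons.mp h with rfl | h
            · omega
            · have := (List.pairwise_cons.mp hdq).1 v h; omega
        subst hveq
        have hperm : (s ++ b :: d).Perm l' := by
          have : (v :: (s ++ b :: d)).Perm (v :: l') := by simpa using hp
          exact this.cons_inv
        simp only [popStep, List.headI, List.tail_cons]
        have hne1 : (b :: d) ≠ ([] : List Int) := by simp
        have hne2 : (v :: s) ≠ ([] : List Int) := by simp
        simp only [if_neg hne1, if_neg hne2]
        rw [if_pos (by simpa using hab)]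
        exact ⟨rfl, hperm, Or.inr rfl, Or.inl rfl⟩
      · -- pop from dq, value b; show v = b
        have hveq : v = b := by
          rcases List.mem_append.mp hvmem with h | h
          · rcases List.mem_cons.mp h with rfl | h
            · omega
            · have := (List.pairwise_cons.mp hsc).1 v h; omega
          · rcases List.mem_cons.mp h with rfl | h
            · rfl
            · have := (List.pairwise_cons.mp hdq).1 v h; omega
        subst hveq
        have hperm : ((a :: s) ++ d).Perm l' := by
          have h1 : ((a :: s) ++ v :: d).Perm (v :: ((a :: s) ++ d)) :=
            (List.perm_middle)
          have : (v :: ((a :: s) ++ d)).Perm (v :: l') := h1.symm.trans hp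
          exact this.cons_inv
        simp only [popStep, List.headI, List.tail_cons]
        have hne1 : (v :: d) ≠ ([] : List Int) := by simp
        have hne2 : (a :: s) ≠ ([] : List Int) := by simp
        simp only [if_neg hne1, if_neg hne2]
        rw [if_neg (by simpa using hab)]
        exact ⟨rfl, hperm, Or.inl rfl, Or.inr rfl⟩

-- the invariant relating A's pair of deques to B's single sorted list, and the main simulation
theorem loop_eq (K : Int) (n : Nat) :
    ∀ (sc dq l : List Int) (cnt : Int),
      sc.length + dq.length = n →
      sc.Pairwise (· ≤ ·) →
      dq.Pairwise (· ≤ ·) →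
      dq.Pairwise (fun d e => d ≤ 3 * e ∧ e ≤ 3 * d) →
      (∀ d ∈ dq, ∀ x ∈ sc, d ≤ 3 * x) →
      l.Pairwise (· ≤ ·) →
      (sc ++ dq).Perm l →
      solLoop K sc dq cnt = solAltLoop K l cnt := by
  induction n with
  | zero =>
    intro sc dq l cnt hn _ _ _ _ _ hp
    have hsc : sc = [] := List.eq_nil_of_length_eq_zero (by omega)
    have hdq : dq = [] := List.eq_nil_of_length_eq_zero (by omega)
    subst hsc; subst hdq
    have hl : l = [] := by
      have : l.Perm [] := by simpa using hp.symm
      exact this.eq_nil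
    subst hl
    rw [solLoop]
    simp [solAltLoop]
  | succ n ih =>
    intro sc dq l cnt hn hsc hdq hdq3 hC4 hl hp
    have hlen1 : 1 ≤ sc.length + dq.length := by omega
    rcases l with _ | ⟨v, l'⟩
    · exfalso
      have h0 : (sc ++ dq).length = ([] : List Int).length := hp.length_eq
      rw [List.length_append] at h0
      simp only [List.length_nil] at h0
      omega
    obtain ⟨hv1, hperm1, hsc1, hdq1⟩ := popStep_spec sc dq v l' hsc hdq hl hp
    set sc1 := (popStep sc dq).2.1 with hsc1def
    set dq1 := (popStep sc dq).2.2 with hdq1def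
    -- shape facts for the first pop
    have hsc1pw : sc1.Pairwise (· ≤ ·) := by
      rcases hsc1 with h | h
      · rw [h]; exact hsc
      · rw [h] at hsc; exact (List.pairwise_cons.mp hsc).2
    have hdq1pw : dq1.Pairwise (· ≤ ·) := by
      rcases hdq1 with h | h
      · rw [h]; exact hdq
      · rw [h] at hdq; exact (List.pairwise_cons.mp hdq).2
    have hdq1pw3 : dq1.Pairwise (fun d e => d ≤ 3 * e ∧ e ≤ 3 * d) := by
      rcases hdq1 with h | h
      · rw [h]; exact hdq3
      · rw [h] at hdq3; exact (List.pairwise_cons.mp hdq3).2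
    have hsc1sub : sc1.Sublist sc := by
      rcases hsc1 with h | h
      · rw [h]
      · rw [h]; exact List.sublist_cons_self _ _
    have hdq1sub : dq1.Sublist dq := by
      rcases hdq1 with h | h
      · rw [h]
      · rw [h]; exact List.sublist_cons_self _ _
    -- "popped value bounds every surviving dq element by a factor 3"
    have hv3 : ∀ d ∈ dq1, d ≤ 3 * v := by
      intro d hd
      rcases hsc1 with h | h
      · -- the first pop came from dq (sc unchanged): v is dq's head
        rcases hdq1 with h' | h'
        · -- neither changed: impossible since lengths drop; derive from popStep_len
          have := popStep_len sc dq hlen1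
          rw [← hsc1def, ← hdq1def] at this
          rw [h, h'] at this; omega
        · rw [h'] at hdq3
          exact ((List.pairwise_cons.mp hdq3).1 d hd).2
      · -- the first pop came from sc: v ∈ sc, use the cross clause
        exact hC4 d (hdq1sub.subset hd) v (by rw [h]; simp)
    rw [solLoop]
    rw [dif_pos hlen1]
    simp only [← hsc1def, ← hdq1def, hv1]
    rw [solAltLoop.eq_def]
    by_cases hK : v ≥ K
    · simp [hK]
    · simp only [if_neg hK, ge_iff_le]
      have hlen' : sc1.length + dq1.length = l'.length := by
        simpa using hperm1.length_eq
      rcases l' with _ | ⟨w, l''⟩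
      · -- one element left in total: A returns -1, B returns -1
        rw [dif_pos (by simp only [List.length_nil] at hlen'; omega)]
      · have hne0 : ¬ (dq1.length + sc1.length = 0) := by
          simp only [List.length_cons] at hlen'; omega
        rw [dif_neg hne0]
        have hl' : (w :: l'').Pairwise (· ≤ ·) := (List.pairwise_cons.mp hl).2
        obtain ⟨hw1, hperm2, hsc2, hdq2⟩ := popStep_spec sc1 dq1 w l'' hsc1pw hdq1pw hl' hperm1
        set sc2 := (popStep sc1 dq1).2.1 with hsc2def
        set dq2 := (popStep sc1 dq1).2.2 with hdq2def
        have hsc2pw : sc2.Pairwise (· ≤ ·) := by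
          rcases hsc2 with h | h
          · rw [h]; exact hsc1pw
          · rw [h] at hsc1pw; exact (List.pairwise_cons.mp hsc1pw).2
        have hdq2pw : dq2.Pairwise (· ≤ ·) := by
          rcases hdq2 with h | h
          · rw [h]; exact hdq1pw
          · rw [h] at hdq1pw; exact (List.pairwise_cons.mp hdq1pw).2
        have hdq2pw3 : dq2.Pairwise (fun d e => d ≤ 3 * e ∧ e ≤ 3 * d) := by
          rcases hdq2 with h | h
          · rw [h]; exact hdq1pw3
          · rw [h] at hdq1pw3; exact (List.pairwise_cons.mp hdq1pw3).2
        have hsc2sub : sc2.Sublist sc1 := by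
          rcases hsc2 with h | h
          · rw [h]
          · rw [h]; exact List.sublist_cons_self _ _
        have hdq2sub : dq2.Sublist dq1 := by
          rcases hdq2 with h | h
          · rw [h]
          · rw [h]; exact List.sublist_cons_self _ _
        have hw3 : ∀ d ∈ dq2, d ≤ 3 * w := by
          intro d hd
          rcases hsc2 with h | h
          · rcases hdq2 with h' | h'
            · have h1' : 1 ≤ sc1.length + dq1.length := by omega
              have := popStep_len sc1 dq1 h1'
              rw [← hsc2def, ← hdq2def] at this
              rw [h, h'] at this; omega
            · rw [h'] at hdq1pw3
              exact ((List.pairwise_cons.mp hdq1pw3).1 d hd).2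
          · have hwsc : w ∈ sc := hsc1sub.subset (by rw [h]; simp)
            exact hC4 d (hdq1sub.subset (hdq2sub.subset hd)) w hwsc
        -- v ≤ w and every element of l'' is ≥ w
        have hvw : v ≤ w := (List.pairwise_cons.mp hl).1 w (by simp)
        have hge : ∀ x ∈ l'', w ≤ x := (List.pairwise_cons.mp hl').1
        have hmem2 : ∀ x, x ∈ sc2 ++ dq2 → x ∈ l'' := fun x hx => hperm2.subset hx
        set s := v + 2 * w with hs
        -- numeric bounds for the appended mix
        have hdlow : ∀ d ∈ dq2, w ≤ d := fun d hd => hge d (hmem2 d (by simp [hd]))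
        have hdv3 : ∀ d ∈ dq2, d ≤ 3 * v := fun d hd => hv3 d (hdq2sub.subset hd)
        -- new invariants for (sc2, dq2 ++ [s])
        have hnew_pw : (dq2 ++ [s]).Pairwise (· ≤ ·) := by
          rw [List.pairwise_append]
          refine ⟨hdq2pw, by simp, ?_⟩
          intro d hd x hx
          simp at hx; subst hx
          have h1 := hdlow d hd
          have h2 := hdv3 d hd
          have h3 := hw3 d hd
          omega
        have hnew_pw3 : (dq2 ++ [s]).Pairwise (fun d e => d ≤ 3 * e ∧ e ≤ 3 * d) := by
          rw [List.pairwise_append]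
          refine ⟨hdq2pw3, by simp, ?_⟩
          intro d hd x hx
          simp at hx; subst hx
          have h1 := hdlow d hd
          have h2 := hdv3 d hd
          have h3 := hw3 d hd
          constructor <;> omega
        have hnew_C4 : ∀ d ∈ dq2 ++ [s], ∀ x ∈ sc2, d ≤ 3 * x := by
          intro d hd x hx
          rcases List.mem_append.mp hd with hd | hd
          · exact hC4 d (hdq1sub.subset (hdq2sub.subset hd)) x
              (hsc1sub.subset (hsc2sub.subset hx))
          · simp at hd; subst hd
            have hxw : w ≤ x := hge x (hmem2 x (by simp [hx]))
            omega
        have hnew_perm : (sc2 ++ (dq2 ++ [s])).Perm (insort s l'') := by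
          refine List.Perm.trans ?_ (insort_perm s l'').symm
          have hassoc : sc2 ++ (dq2 ++ [s]) = (sc2 ++ dq2) ++ [s] :=
            (List.append_assoc _ _ _).symm
          rw [hassoc]
          exact (hperm2.append_right [s]).trans (List.perm_append_singleton s l'')
        have hnew_sorted : (insort s l'').Pairwise (· ≤ ·) :=
          insort_pairwise s l'' (List.pairwise_cons.mp hl').2
        have hlen2 : sc2.length + (dq2 ++ [s]).length = n := by
          have h1' : 1 ≤ sc1.length + dq1.length := by omega
          have e1 := popStep_len sc dq hlen1
          have e2 := popStep_len sc1 dq1 h1'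
          rw [← hsc1def, ← hdq1def] at e1
          rw [← hsc2def, ← hdq2def] at e2
          simp [List.length_append]
          omega
        have := ih sc2 (dq2 ++ [s]) (insort s l'') (cnt + 1)
          hlen2 hsc2pw hnew_pw hnew_pw3 hnew_C4 hnew_sorted hnew_perm
        rw [hw1]
        have hmul : v + w * 2 = s := by rw [hs]; ring
        rw [hmul]
        exact this

-- ===== VERDICT (by name: the statement is the Claim_ definition above) =====
theorem solution_spec : Claim_equal_solution := by
  unfold Claim_equal_solution
  intro scovile K _
  unfold Spec_solution solution solution_alt
  set l := PySem.List.sorted scovile (fun x => x) false with hl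
  have hpw : l.Pairwise (· ≤ ·) := by
    have := PySem.List.sorted_pairwise (xs := scovile) (key := fun x => x)
    simpa using this
  exact loop_eq K l.length l [] l 0 (by simp) hpw (by simp) (by simp) (by simp) hpw (by simp)
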